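-- pv_equiv track=rewrite | github.com/sunmuchao/ai_incubation_platform | ai_incubation_platform/Her/src/agent/skills/omniscient_insight_skill.py | _format_hours
-- ===== SOURCE A (Python) =====
-- def _format_hours(hours: list) -> str:
--     """格式化时间列表"""
--     if not hours:
--         return "不固定时间"
--
--     # 分组
--     morning = [h for h in hours if 6 <= h < 12]
--     afternoon = [h for h in hours if 12 <= h < 18]
--     evening = [h for h in hours if 18 <= h < 24 or h < 6]
--
--     parts = []
--     if morning:
--         parts.append("上午")
--     if afternoon:
--         parts.append("下午")
--     if evening:
--         parts.append("晚上")
--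
--     return "、".join(parts) if parts else "全天"
-- ===== SOURCE B (Python) =====
-- def _format_hours(hours: list) -> str:
--     """格式化时间列表"""
--     if not hours:
--         return "不固定时间"
--
--     morning = afternoon = evening = False
--     for h in hours:
--         if 6 <= h < 12:
--             morning = True
--         elif 12 <= h < 18:
--             afternoon = True
--         elif 18 <= h < 24 or h < 6:
--             evening = True
--
--     if not (morning or afternoon or evening):
--         return "全天"
--     parts = []
--     if morning:
--         parts.append("上午")
--     if afternoon:
--         parts.append("下午")
--     if evening:
--         parts.append("晚上")
--     return "、".join(parts)
-- ===== Notes on version B (the rewrite author's own statement) =====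
-- stated objective: alternative
-- what changed: Replaces the three list-comprehension scans that materialise bucket lists with a single pass over hours maintaining three booleans (if/elif with A's exact non-complementary evening condition), then emits labels from the flags.
import Mathlib
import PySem

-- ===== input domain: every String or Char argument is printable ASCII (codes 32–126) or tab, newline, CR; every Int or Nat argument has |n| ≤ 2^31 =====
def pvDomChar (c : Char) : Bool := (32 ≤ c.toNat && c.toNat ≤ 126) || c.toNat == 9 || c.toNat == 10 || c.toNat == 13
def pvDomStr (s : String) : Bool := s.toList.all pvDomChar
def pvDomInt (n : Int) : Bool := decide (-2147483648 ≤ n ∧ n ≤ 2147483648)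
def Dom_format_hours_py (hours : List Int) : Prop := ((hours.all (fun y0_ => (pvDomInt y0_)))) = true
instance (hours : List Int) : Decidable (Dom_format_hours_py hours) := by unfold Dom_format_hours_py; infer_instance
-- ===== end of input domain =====

-- B replaces A's three filtering passes by one fold over the hours keeping three booleans (alternative decomposition, same cost).

-- ===== PORT A =====
def format_hours_py (hours : List Int) : String :=
  if hours = [] then "不固定时间"
  else
    let morning := hours.filter (fun h => decide (6 ≤ h ∧ h < 12))
    let afternoon := hours.filter (fun h => decide (12 ≤ h ∧ h < 18))
    let evening := hours.filter (fun h => decide ((18 ≤ h ∧ h < 24) ∨ h < 6))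
    let parts : List String :=
      (if morning ≠ [] then ["上午"] else []) ++
      (if afternoon ≠ [] then ["下午"] else []) ++
      (if evening ≠ [] then ["晚上"] else [])
    if parts = [] then "全天" else PySem.Str.join "、" parts

-- ===== PORT B =====
def fhStep (s : Bool × Bool × Bool) (h : Int) : Bool × Bool × Bool :=
  if 6 ≤ h ∧ h < 12 then (true, s.2.1, s.2.2)
  else if 12 ≤ h ∧ h < 18 then (s.1, true, s.2.2)
  else if (18 ≤ h ∧ h < 24) ∨ h < 6 then (s.1, s.2.1, true)
  else s

def format_hours_py_alt (hours : List Int) : String :=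
  if hours = [] then "不固定时间"
  else
    let f := hours.foldl fhStep (false, false, false)
    if !f.1 && !f.2.1 && !f.2.2 then "全天"
    else
      PySem.Str.join "、"
        ((if f.1 then ["上午"] else []) ++
         (if f.2.1 then ["下午"] else []) ++
         (if f.2.2 then ["晚上"] else []))

-- ===== PRECONDITION & SPEC =====
def Spec_format_hours_py (hours : List Int) (out : String) : Prop := out = format_hours_py_alt hours
instance (hours : List Int) (out : String) : Decidable (Spec_format_hours_py hours out) := by unfold Spec_format_hours_py; infer_instance

-- ===== CLAIM (what is proved, stated in full; the proofs are below) =====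
def Claim_equal_format_hours_py : Prop := ∀ (hours : List Int), Dom_format_hours_py hours → Spec_format_hours_py hours (format_hours_py hours)

-- ===== LEMMAS AND PROOFS =====

-- One step of the fold sets exactly the flag of the (disjoint) bucket h falls in.
theorem fhStep_eq (s : Bool × Bool × Bool) (h : Int) :
    fhStep s h =
      (s.1 || decide (6 ≤ h ∧ h < 12),
       s.2.1 || decide (12 ≤ h ∧ h < 18),
       s.2.2 || decide ((18 ≤ h ∧ h < 24) ∨ h < 6)) := by
  obtain ⟨a, b, c⟩ := s
  simp only [fhStep]
  split_ifs with h1 h2 h3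
  · have n2 : ¬(12 ≤ h ∧ h < 18) := by omega
    have n3 : ¬((18 ≤ h ∧ h < 24) ∨ h < 6) := by omega
    simp [h1, n2, n3]
  · have n3 : ¬((18 ≤ h ∧ h < 24) ∨ h < 6) := by omega
    simp [h1, h2, n3]
  · simp [h1, h2, h3]
  · simp [h1, h2, h3]

-- The fold computes "does some element satisfy each condition".
theorem fhStep_foldl (hours : List Int) (s : Bool × Bool × Bool) :
    hours.foldl fhStep s =
      (s.1 || hours.any (fun h => decide (6 ≤ h ∧ h < 12)),
       s.2.1 || hours.any (fun h => decide (12 ≤ h ∧ h < 18)),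
       s.2.2 || hours.any (fun h => decide ((18 ≤ h ∧ h < 24) ∨ h < 6))) := by
  induction hours generalizing s with
  | nil => simp
  | cons h t ih =>
    simp only [List.foldl_cons, List.any_cons, fhStep_eq, ih]
    simp [Bool.or_assoc]

-- A's "filter nonempty" test is the same as "any".
theorem ite_filter_any {β : Type} (p : Int → Bool) (l : List Int) (s e : β) :
    (if l.filter p ≠ [] then s else e) = (if l.any p then s else e) := by
  have key : (l.filter p = []) ↔ (l.any p = false) := by
    simp [List.filter_eq_nil_iff, List.any_eq_false]
  split_ifs with h1 h2 <;> first | rfl | (exfalso; simp_all)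

-- ===== VERDICT (by name: the statement is the Claim_ definition above) =====
theorem format_hours_py_spec : Claim_equal_format_hours_py := by
  intro hours _
  unfold Spec_format_hours_py format_hours_py format_hours_py_alt
  by_cases hnil : hours = []
  · simp [hnil]
  · simp only [if_neg hnil, fhStep_foldl, Bool.false_or, ite_filter_any]
    cases hm : hours.any (fun h => decide (6 ≤ h ∧ h < 12)) <;>
    cases ha : hours.any (fun h => decide (12 ≤ h ∧ h < 18)) <;>
    cases he : hours.any (fun h => decide ((18 ≤ h ∧ h < 24) ∨ h < 6)) <;>
      simp [hm, ha, he]
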